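-- pv_equiv track=rewrite | github.com/map-lo/DrumEngine01 | src/tci-reverse-engineering/analyze_segment_values.py | analyze_segments
-- ===== SOURCE A (Python) =====
-- MARKERS = {0x01, 0x02, 0x04, 0x08, 0x10, 0x20, 0x40, 0x80}
--
-- def analyze_segments(data, start_offset):
--     segments = []
--     i = start_offset
--     while i < len(data):
--         b = data[i]
--         if b in MARKERS:
--             control = b
--             i += 1
--             seg_start = i
--             while i < len(data) and data[i] not in MARKERS:
--                 i += 1
--             seg_data = data[seg_start:i]
--             segments.append((control, seg_start, seg_data))
--         else:
--             i += 1
--     return segments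
-- ===== SOURCE B (Python) =====
-- MARKERS = {0x01, 0x02, 0x04, 0x08, 0x10, 0x20, 0x40, 0x80}
--
-- def analyze_segments(data, start_offset):
--     n = len(data)
--     marks = [p for p in range(n) if p >= start_offset and data[p] in MARKERS]
--     return [(data[p], p + 1, data[p + 1:q])
--             for p, q in zip(marks, marks[1:] + [n])]
-- ===== Notes on version B (the rewrite author's own statement) =====
-- stated objective: simpler
-- what changed: Replaces A's interleaved skip/collect while-loop with nested inner scan by one pass collecting all marker indices >= start_offset, then a pairwise pass over consecutive marker positions (next mark or len(data) as segment end).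
-- outside the precondition, e.g. on analyze_segments([0, 1], -1): A returns [(1, 0, [0]), (1, 2, [])], B returns [(1, 2, [])]
import Mathlib
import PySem

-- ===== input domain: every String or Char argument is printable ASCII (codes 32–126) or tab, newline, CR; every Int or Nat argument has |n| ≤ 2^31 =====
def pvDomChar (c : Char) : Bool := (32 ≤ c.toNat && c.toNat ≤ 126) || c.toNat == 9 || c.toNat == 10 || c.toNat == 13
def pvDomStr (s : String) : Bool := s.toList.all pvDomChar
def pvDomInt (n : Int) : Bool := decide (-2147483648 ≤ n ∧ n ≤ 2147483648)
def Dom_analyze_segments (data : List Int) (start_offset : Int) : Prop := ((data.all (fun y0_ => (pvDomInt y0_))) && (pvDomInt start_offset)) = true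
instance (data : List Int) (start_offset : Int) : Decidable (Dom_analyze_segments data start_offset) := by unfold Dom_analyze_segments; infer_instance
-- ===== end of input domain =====

-- B replaces A's interleaved skip/collect scan by one pass collecting marker indices
-- plus a pairwise pass over consecutive marker positions (objective: simpler).

-- ===== PORT A =====
def pvMARKERS : List Int := [0x01, 0x02, 0x04, 0x08, 0x10, 0x20, 0x40, 0x80]

-- inner 'while i < len(data) and data[i] not in MARKERS: i += 1'
def pvInnerA (data : List Int) (i : Nat) : Nat :=
  if h : i < data.length then
    if data[i] ∈ pvMARKERS then i else pvInnerA data (i + 1)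
  else i
termination_by data.length - i

theorem pvInnerA_ge (data : List Int) (i : Nat) : i ≤ pvInnerA data i := by
  unfold pvInnerA
  split
  · split
    · exact le_refl i
    · exact le_trans (Nat.le_succ i) (pvInnerA_ge data (i + 1))
  · exact le_refl i
termination_by data.length - i

-- outer while loop; 'data[seg_start:i]' with 0 ≤ seg_start ≤ i is exactly drop/take
def pvLoopA (data : List Int) (i : Nat) (acc : List (Int × Int × List Int)) :
    List (Int × Int × List Int) :=
  if h : i < data.length then
    if data[i] ∈ pvMARKERS then
      pvLoopA data (pvInnerA data (i + 1))
        (acc ++ [(data[i], ((i : Int) + 1),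
                  (data.drop (i + 1)).take (pvInnerA data (i + 1) - (i + 1)))])
    else pvLoopA data (i + 1) acc
  else acc
termination_by data.length - i
decreasing_by
  · have := pvInnerA_ge data (i + 1); omega
  · omega

-- index i as a Nat: exact for 0 ≤ start_offset (guaranteed by Pre_)
def analyze_segments (data : List Int) (start_offset : Int) : List (Int × Int × List Int) :=
  pvLoopA data start_offset.toNat []

-- ===== PORT B =====
-- one pass collecting marker indices ≥ start_offset, then a pairwise pass
def analyze_segments_alt (data : List Int) (start_offset : Int) : List (Int × Int × List Int) :=
  let n := data.length
  let marks := (List.range n).filter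
    (fun p : Nat => decide (start_offset ≤ (p : Int)) && decide (data.getD p 0 ∈ pvMARKERS))
  (marks.zip (marks.tail ++ [n])).map
    (fun pq => (data.getD pq.1 0, ((pq.1 : Int) + 1),
                (data.drop (pq.1 + 1)).take (pq.2 - (pq.1 + 1))))

-- ===== PRECONDITION & SPEC =====
-- Pre_ restricts to the natural domain of non-negative start offsets: for start_offset < 0
-- Python A either raises IndexError or reads data with negative-index wraparound, which is
-- outside the function's intended use (offsets into the byte stream).
def Pre_analyze_segments (data : List Int) (start_offset : Int) : Prop := 0 ≤ start_offset
instance (data : List Int) (start_offset : Int) : Decidable (Pre_analyze_segments data start_offset) := by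
  unfold Pre_analyze_segments; infer_instance

def pvWitness_analyze_segments : List Int × Int := ([1, 10, 20, 2, 5], 0)

def Spec_analyze_segments (data : List Int) (start_offset : Int) (out : List (Int × Int × List Int)) : Prop := out = analyze_segments_alt data start_offset
instance (data : List Int) (start_offset : Int) (out : List (Int × Int × List Int)) : Decidable (Spec_analyze_segments data start_offset out) := by unfold Spec_analyze_segments; infer_instance

-- ===== CLAIM (what is proved, stated in full; the proofs are below) =====
def Claim_equal_analyze_segments : Prop := ∀ (data : List Int) (start_offset : Int), Dom_analyze_segments data start_offset → Pre_analyze_segments data start_offset → Spec_analyze_segments data start_offset (analyze_segments data start_offset)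

-- ===== LEMMAS AND PROOFS =====

-- marker positions from index i on, as a filtered contiguous range
def pvK (data : List Int) (i : Nat) : List Nat :=
  (List.range' i (data.length - i)).filter (fun p => decide (data.getD p 0 ∈ pvMARKERS))

-- the pairwise pass of B
def pvBuild (data : List Int) (ms : List Nat) : List (Int × Int × List Int) :=
  (ms.zip (ms.tail ++ [data.length])).map
    (fun pq => (data.getD pq.1 0, ((pq.1 : Int) + 1),
                (data.drop (pq.1 + 1)).take (pq.2 - (pq.1 + 1))))

theorem pvK_stop (data : List Int) (i : Nat) (h : data.length ≤ i) : pvK data i = [] := by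
  unfold pvK
  have : data.length - i = 0 := by omega
  simp [this]

theorem pvK_succ (data : List Int) (i : Nat) (h : i < data.length) :
    pvK data i = (if data.getD i 0 ∈ pvMARKERS then [i] else []) ++ pvK data (i + 1) := by
  unfold pvK
  have h1 : data.length - i = (data.length - (i + 1)) + 1 := by omega
  rw [h1, List.range'_succ, List.filter_cons]
  split_ifs with hm <;> simp_all

theorem pvInnerA_le (data : List Int) (i : Nat) (h : i ≤ data.length) :
    pvInnerA data i ≤ data.length := by
  unfold pvInnerA
  split
  · split
    · assumption
    · exact pvInnerA_le data (i + 1) (by omega)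
  · omega
termination_by data.length - i

theorem pvInnerA_marker (data : List Int) (i : Nat)
    (h : pvInnerA data i < data.length) : data.getD (pvInnerA data i) 0 ∈ pvMARKERS := by
  by_cases h1 : i < data.length
  · by_cases h2 : data[i] ∈ pvMARKERS
    · rw [pvInnerA, dif_pos h1, if_pos h2]
      simpa [List.getD, List.getElem?_eq_getElem, h1] using h2
    · rw [pvInnerA, dif_pos h1, if_neg h2] at h ⊢
      exact pvInnerA_marker data (i + 1) h
  · rw [pvInnerA, dif_neg h1] at h
    omega
termination_by data.length - i

theorem pvK_innerA (data : List Int) (i : Nat) :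
    pvK data i = pvK data (pvInnerA data i) := by
  by_cases h1 : i < data.length
  · by_cases h2 : data[i] ∈ pvMARKERS
    · rw [pvInnerA, dif_pos h1, if_pos h2]
    · rw [pvInnerA, dif_pos h1, if_neg h2]
      rw [pvK_succ data i h1]
      have hm : data.getD i 0 ∉ pvMARKERS := by
        simpa [List.getD, List.getElem?_eq_getElem, h1] using h2
      rw [if_neg hm, List.nil_append]
      exact pvK_innerA data (i + 1)
  · rw [pvInnerA, dif_neg h1]
termination_by data.length - i

theorem pvBuild_cons (data : List Int) (i : Nat) (ms : List Nat) :
    pvBuild data (i :: ms) =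
      (data.getD i 0, ((i : Int) + 1),
        (data.drop (i + 1)).take ((ms.headD data.length) - (i + 1))) :: pvBuild data ms := by
  cases ms <;> simp [pvBuild]

theorem pvK_head (data : List Int) (i : Nat) (h : i ≤ data.length) :
    (pvK data (pvInnerA data i)).headD data.length = pvInnerA data i ∨
      (pvInnerA data i = data.length ∧ pvK data (pvInnerA data i) = []) := by
  have hle := pvInnerA_le data i h
  by_cases hlt : pvInnerA data i < data.length
  · left
    have hm := pvInnerA_marker data i hlt
    rw [pvK_succ data _ hlt, if_pos hm]
    simp
  · right
    have he : pvInnerA data i = data.length := by omega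
    exact ⟨he, pvK_stop data _ (by omega)⟩

theorem pvLoopA_build (data : List Int) (i : Nat) (acc : List (Int × Int × List Int)) :
    pvLoopA data i acc = acc ++ pvBuild data (pvK data i) := by
  by_cases h : i < data.length
  · by_cases hm : data[i] ∈ pvMARKERS
    · have hm' : data.getD i 0 ∈ pvMARKERS := by
        simpa [List.getD, List.getElem?_eq_getElem, h] using hm
      rw [pvLoopA, dif_pos h, if_pos hm]
      rw [pvLoopA_build data (pvInnerA data (i + 1))]
      rw [pvK_succ data i h, pvK_innerA data (i + 1)]
      rw [if_pos hm', List.singleton_append]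
      rw [pvBuild_cons]
      rcases pvK_head data (i + 1) (by omega) with hh | ⟨he, hn⟩
      · rw [hh]
        simp [List.getD, List.getElem?_eq_getElem, h]
      · rw [hn, he]
        simp [List.getD, List.getElem?_eq_getElem, h, pvBuild]
    · have hm' : data.getD i 0 ∉ pvMARKERS := by
        simpa [List.getD, List.getElem?_eq_getElem, h] using hm
      rw [pvLoopA, dif_pos h, if_neg hm]
      rw [pvLoopA_build data (i + 1), pvK_succ data i h, if_neg hm', List.nil_append]
  · rw [pvLoopA, dif_neg h]
    rw [pvK_stop data i (by omega)]
    simp [pvBuild]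
termination_by data.length - i
decreasing_by
  · have := pvInnerA_ge data (i + 1); omega
  · omega

-- B's filtered range equals pvK from start_offset.toNat when 0 ≤ start_offset
theorem pvMarks_eq (data : List Int) (s : Int) (hs : 0 ≤ s) :
    (List.range data.length).filter
        (fun p : Nat => decide (s ≤ (p : Int)) && decide (data.getD p 0 ∈ pvMARKERS)) =
      pvK data s.toNat := by
  unfold pvK
  induction data.length with
  | zero => simp
  | succ n ih =>
    rw [List.range_succ, List.filter_append, ih]
    by_cases hn : s.toNat ≤ n
    · have h1 : n + 1 - s.toNat = (n - s.toNat) + 1 := by omega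
      have h2 : s.toNat + (n - s.toNat) = n := by omega
      rw [h1, List.range'_1_concat, List.filter_append, h2]
      have hd : (decide (s ≤ (n : Int)) : Bool) = true := by
        simp; omega
      simp [List.filter_cons, hd]
    · have h0 : n + 1 - s.toNat = if s.toNat = n + 1 then 0 else n + 1 - s.toNat := by
        split <;> omega
      have : (decide (s ≤ (n : Int)) : Bool) = false := by
        simp; omega
      simp only [List.filter_cons, List.filter_nil, this, Bool.false_and, List.append_nil]
      by_cases he : s.toNat = n + 1
      · have : n - s.toNat = 0 := by omega
        simp [he, this]
      · have : n + 1 - s.toNat = 0 := by omega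
        have : n - s.toNat = 0 := by omega
        simp_all

-- ===== VERDICT (by name: the statement is the Claim_ definition above) =====
theorem analyze_segments_spec : Claim_equal_analyze_segments := by
  intro data s _ hpre
  unfold Spec_analyze_segments analyze_segments
  simp only [analyze_segments_alt]
  rw [pvLoopA_build, pvMarks_eq data s hpre]
  rfl
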